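-- pv_equiv track=rewrite | github.com/kdm0927/codingtest | ParkJuHyun/week_6/체육복.py | solution
-- ===== SOURCE A (Python) =====
-- def solution(n, lost, reserve):
--     set_reserve = set(reserve) - set(lost)
--     set_lost = set(lost)-set(reserve)
--
--     for i in sorted(set_lost):
--         if i-1 in set_reserve:
--             set_reserve.remove(i-1)
--         elif i+1 in set_reserve:
--             set_reserve.remove(i+1)
--         else:
--             n-=1
--
--     return n
-- ===== SOURCE B (Python) =====
-- def solution(n, lost, reserve):
--     # Two-pointer merge over the two sorted deduplicated difference lists:
--     # no set mutation, no membership scans during the sweep.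
--     ls = sorted(set(lost) - set(reserve))
--     rs = sorted(set(reserve) - set(lost))
--     fail = 0
--     j = 0
--     for l in ls:
--         while j < len(rs) and rs[j] < l - 1:
--             j += 1
--         if j < len(rs) and rs[j] <= l + 1:
--             j += 1
--         else:
--             fail += 1
--     return n - fail
-- ===== Notes on version B (the rewrite author's own statement) =====
-- stated objective: alternative
-- what changed: Replaces A's mutable reserve set with per-student membership tests and removals by a single two-pointer merge sweep over the two sorted deduplicated difference lists, counting failures and subtracting once at the end.
import Mathlib
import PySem

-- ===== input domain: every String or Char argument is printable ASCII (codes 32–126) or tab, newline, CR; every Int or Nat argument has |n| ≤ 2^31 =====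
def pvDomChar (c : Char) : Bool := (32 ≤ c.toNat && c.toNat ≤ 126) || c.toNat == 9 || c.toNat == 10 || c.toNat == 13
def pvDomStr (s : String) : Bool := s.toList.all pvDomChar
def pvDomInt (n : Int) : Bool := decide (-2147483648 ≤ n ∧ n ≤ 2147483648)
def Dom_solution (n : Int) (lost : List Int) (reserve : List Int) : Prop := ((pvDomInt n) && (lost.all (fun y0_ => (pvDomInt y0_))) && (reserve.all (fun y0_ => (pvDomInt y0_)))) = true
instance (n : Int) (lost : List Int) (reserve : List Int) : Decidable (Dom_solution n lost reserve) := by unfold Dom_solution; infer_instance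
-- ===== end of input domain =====

-- B replaces A's per-student membership tests and set mutation by one two-pointer merge
-- of the two sorted deduplicated difference lists (objective: alternative; return value only).

-- ===== PORT A =====
def solution (n : Int) (lost : List Int) (reserve : List Int) : Int :=
  let set_reserve : PySem.Set Int := PySem.Set.diff (PySem.Set.ofList reserve) (PySem.Set.ofList lost)
  let set_lost : PySem.Set Int := PySem.Set.diff (PySem.Set.ofList lost) (PySem.Set.ofList reserve)
  -- for i in sorted(set_lost): … (the loop carries the pair (set_reserve, n));
  -- Python's set.remove is guarded by the membership test, so it is Set.discard here
  let st := (PySem.List.sorted set_lost (fun x => x) false).foldl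
    (fun (st : PySem.Set Int × Int) i =>
      if PySem.Set.contains st.1 (i - 1) then (PySem.Set.discard st.1 (i - 1), st.2)
      else if PySem.Set.contains st.1 (i + 1) then (PySem.Set.discard st.1 (i + 1), st.2)
      else (st.1, st.2 - 1))
    (set_reserve, n)
  st.2

-- ===== PORT B =====
-- Source B's sweep: 'for l in ls' with pointer j into rs; advancing j = dropping the head of rs
def twoPtrFail : List Int → List Int → Int
  | [], _ => 0
  | _ :: ls, [] => 1 + twoPtrFail ls []
  | l :: ls, r :: rs =>
    if r < l - 1 then twoPtrFail (l :: ls) rs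
    else if r ≤ l + 1 then twoPtrFail ls rs
    else 1 + twoPtrFail ls (r :: rs)
  termination_by ls rs => ls.length + rs.length

def solution_alt (n : Int) (lost : List Int) (reserve : List Int) : Int :=
  let ls := PySem.List.sorted (PySem.Set.diff (PySem.Set.ofList lost) (PySem.Set.ofList reserve)) (fun x => x) false
  let rs := PySem.List.sorted (PySem.Set.diff (PySem.Set.ofList reserve) (PySem.Set.ofList lost)) (fun x => x) false
  n - twoPtrFail ls rs

-- ===== PRECONDITION & SPEC =====
def Spec_solution (n : Int) (lost : List Int) (reserve : List Int) (out : Int) : Prop := out = solution_alt n lost reserve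
instance (n : Int) (lost : List Int) (reserve : List Int) (out : Int) : Decidable (Spec_solution n lost reserve out) := by unfold Spec_solution; infer_instance

-- ===== CLAIM (what is proved, stated in full; the proofs are below) =====
def Claim_equal_solution : Prop := ∀ (n : Int) (lost : List Int) (reserve : List Int), Dom_solution n lost reserve → Spec_solution n lost reserve (solution n lost reserve)

-- ===== LEMMAS AND PROOFS =====

-- the failure count of A's loop, as a recursion over the sorted lost list with the reserve set as state
def failF : List Int → PySem.Set Int → Int
  | [], _ => 0
  | i :: xs, s =>
    if PySem.Set.contains s (i - 1) then failF xs (PySem.Set.discard s (i - 1))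
    else if PySem.Set.contains s (i + 1) then failF xs (PySem.Set.discard s (i + 1))
    else 1 + failF xs s

lemma set_contains_eq (s : PySem.Set Int) (x : Int) :
    PySem.Set.contains s x = decide (x ∈ s) := by
  simp [PySem.Set.contains]

-- A's fold returns n minus the failure count
lemma foldl_eq_sub_failF (xs : List Int) (s : PySem.Set Int) (n : Int) :
    (xs.foldl
      (fun (st : PySem.Set Int × Int) i =>
        if PySem.Set.contains st.1 (i - 1) then (PySem.Set.discard st.1 (i - 1), st.2)
        else if PySem.Set.contains st.1 (i + 1) then (PySem.Set.discard st.1 (i + 1), st.2)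
        else (st.1, st.2 - 1))
      (s, n)).2 = n - failF xs s := by
  induction xs generalizing s n with
  | nil => simp [failF]
  | cons i xs ih =>
    simp only [List.foldl_cons, failF]
    split_ifs with h1 h2
    · rw [ih]
    · rw [ih]
    · rw [ih]; omega

-- failF depends on the reserve state only through its members
lemma failF_perm (xs : List Int) (s t : PySem.Set Int) (h : s.Perm t) :
    failF xs s = failF xs t := by
  induction xs generalizing s t with
  | nil => rfl
  | cons i xs ih =>
    have hm1 : PySem.Set.contains s (i - 1) = PySem.Set.contains t (i - 1) := by
      simp [h.mem_iff]
    have hm2 : PySem.Set.contains s (i + 1) = PySem.Set.contains t (i + 1) := by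
      simp [h.mem_iff]
    simp only [failF, hm1, hm2]
    split_ifs with h1 h2
    · exact ih _ _ (h.filter _)
    · exact ih _ _ (h.filter _)
    · rw [ih _ _ h]

-- a reserve element smaller than every remaining lost-1 is never used again
lemma failF_skip (xs : List Int) (r : Int) (s : PySem.Set Int)
    (h : ∀ x ∈ xs, r < x - 1) :
    failF xs (r :: s) = failF xs s := by
  induction xs generalizing s with
  | nil => rfl
  | cons i xs ih =>
    have hr : r < i - 1 := h i (by simp)
    have h' : ∀ x ∈ xs, r < x - 1 := fun x hx => h x (by simp [hx])
    have e1 : PySem.Set.contains (r :: s) (i - 1) = PySem.Set.contains s (i - 1) := by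
      simp only [set_contains_eq, List.mem_cons]
      have : ¬ (i - 1 = r) := by omega
      simp [this]
    have e2 : PySem.Set.contains (r :: s) (i + 1) = PySem.Set.contains s (i + 1) := by
      simp only [set_contains_eq, List.mem_cons]
      have : ¬ (i + 1 = r) := by omega
      simp [this]
    have d1 : PySem.Set.discard (r :: s) (i - 1) = r :: PySem.Set.discard s (i - 1) := by
      simp only [PySem.Set.discard, List.filter_cons]
      have : (r == i - 1) = false := by simp; omega
      simp [this]
    have d2 : PySem.Set.discard (r :: s) (i + 1) = r :: PySem.Set.discard s (i + 1) := by
      simp only [PySem.Set.discard, List.filter_cons]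
      have : (r == i + 1) = false := by simp; omega
      simp [this]
    simp only [failF, e1, e2]
    split_ifs with h1 h2
    · rw [d1, ih _ h']
    · rw [d2, ih _ h']
    · rw [ih _ h']

lemma mem_ge_of_sorted {r : Int} {rs : List Int} (hp : (r :: rs).Pairwise (· < ·))
    {y : Int} (hy : y ∈ r :: rs) : r ≤ y := by
  rcases List.mem_cons.mp hy with rfl | hy
  · exact le_refl y
  · exact le_of_lt (List.rel_of_pairwise_cons hp hy)

-- the heart: on sorted, disjoint lists A's greedy and the two-pointer sweep agree
lemma failF_eq_twoPtrFail (ls rs : List Int)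
    (hl : ls.Pairwise (· < ·)) (hr : rs.Pairwise (· < ·))
    (hd : ∀ x ∈ ls, x ∉ rs) :
    failF ls rs = twoPtrFail ls rs := by
  induction ls, rs using twoPtrFail.induct with
  | case1 rs => simp [failF, twoPtrFail]
  | case2 l ls ih =>
    simp only [failF, twoPtrFail, set_contains_eq, List.not_mem_nil, decide_false,
      Bool.false_eq_true, if_false]
    rw [ih hl.tail (by simp) (by simp)]
  | case3 l ls r rs hlt ih =>
    -- r < l - 1 : B skips r; for A, r can never be picked any more
    rw [twoPtrFail, if_pos hlt]
    rw [show failF (l :: ls) (r :: rs) = failF (l :: ls) rs from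
      failF_skip _ _ _ (fun x hx => by
        rcases List.mem_cons.mp hx with rfl | hx
        · omega
        · have := List.rel_of_pairwise_cons hl hx; omega)]
    exact ih hl hr.tail (fun x hx hxr => hd x hx (by simp [hxr]))
  | case4 l ls r rs hge hle ih =>
    -- l - 1 ≤ r ≤ l + 1 and r ≠ l : a match on both sides
    have hge' : l - 1 ≤ r := by omega
    have hrl : r ≠ l := fun h => hd l (by simp) (by simp [h.symm])
    have htail : ∀ y ∈ rs, r < y := fun y hy => List.rel_of_pairwise_cons hr hy
    rw [twoPtrFail, if_neg hge, if_pos hle]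
    have hrec : failF (l :: ls) (r :: rs) = failF ls rs := by
      rcases (by omega : r = l - 1 ∨ r = l + 1) with h | h
      · subst h
        have hc : PySem.Set.contains ((l - 1) :: rs) (l - 1) = true := by
          simp
        rw [failF, if_pos hc]
        have hd1 : PySem.Set.discard ((l - 1) :: rs) (l - 1) = rs := by
          simp only [PySem.Set.discard, List.filter_cons, beq_self_eq_true, Bool.not_true,
            Bool.false_eq_true, if_false]
          exact List.filter_eq_self.mpr (fun y hy => by
            have := htail y hy; simp; omega)
        rw [hd1]
      · subst h
        have hm1 : (l - 1) ∉ (l + 1) :: rs := by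
          intro hm
          rcases List.mem_cons.mp hm with h' | h'
          · omega
          · have := htail _ h'; omega
        have hc1 : PySem.Set.contains ((l + 1) :: rs) (l - 1) = false := by
          simp [PySem.Set.contains, hm1]
        have hc2 : PySem.Set.contains ((l + 1) :: rs) (l + 1) = true := by
          simp
        rw [failF, if_neg (by simp only [set_contains_eq, decide_eq_true_eq]; exact hm1), if_pos hc2]
        have hd2 : PySem.Set.discard ((l + 1) :: rs) (l + 1) = rs := by
          simp only [PySem.Set.discard, List.filter_cons, beq_self_eq_true, Bool.not_true,
            Bool.false_eq_true, if_false]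
          exact List.filter_eq_self.mpr (fun y hy => by
            have := htail y hy; simp; omega)
        rw [hd2]
    rw [hrec]
    exact ih hl.tail hr.tail (fun x hx hxr => hd x (by simp [hx]) (by simp [hxr]))
  | case5 l ls r rs hge hgt ih =>
    -- r > l + 1 : neither l-1 nor l+1 is available; both sides count a failure
    have hgt' : l + 1 < r := by omega
    have hall : ∀ y ∈ r :: rs, l + 1 < y := fun y hy => by
      have := mem_ge_of_sorted hr hy; omega
    have hm1 : (l - 1) ∉ r :: rs := fun hm => by have := hall _ hm; omega
    have hm2 : (l + 1) ∉ r :: rs := fun hm => by have := hall _ hm; omega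
    rw [failF, if_neg (by simp [PySem.Set.contains, hm1]),
      if_neg (by simp [PySem.Set.contains, hm2])]
    rw [twoPtrFail, if_neg hge, if_neg hgt]
    rw [ih hl.tail hr (fun x hx => hd x (by simp [hx]))]

lemma pairwise_lt_of_le_nodup {l : List Int}
    (h1 : l.Pairwise (· ≤ ·)) (h2 : l.Nodup) : l.Pairwise (· < ·) :=
  (h1.and h2).imp (fun h => lt_of_le_of_ne h.1 h.2)

-- ===== VERDICT (by name: the statement is the Claim_ definition above) =====
theorem solution_spec : Claim_equal_solution := by
  intro n lost reserve _
  unfold Spec_solution solution solution_alt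
  simp only []
  set sr : PySem.Set Int := PySem.Set.diff (PySem.Set.ofList reserve) (PySem.Set.ofList lost) with hsr
  set sl : PySem.Set Int := PySem.Set.diff (PySem.Set.ofList lost) (PySem.Set.ofList reserve) with hsl
  set lsS := PySem.List.sorted sl (fun x => x) false with hls
  set rsS := PySem.List.sorted sr (fun x => x) false with hrs
  rw [foldl_eq_sub_failF]
  have hperm : sr.Perm rsS := (PySem.List.sorted_perm sr (fun x => x) false).symm
  rw [failF_perm _ _ _ hperm]
  have hnl : lsS.Nodup := ((PySem.List.sorted_perm sl (fun x => x) false)).nodup_iff.mpr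
    (PySem.Set.nodup_diff _ _ (PySem.Set.nodup_ofList lost))
  have hnr : rsS.Nodup := ((PySem.List.sorted_perm sr (fun x => x) false)).nodup_iff.mpr
    (PySem.Set.nodup_diff _ _ (PySem.Set.nodup_ofList reserve))
  have hpl : lsS.Pairwise (· < ·) :=
    pairwise_lt_of_le_nodup (PySem.List.sorted_pairwise sl (fun x => x)) hnl
  have hpr : rsS.Pairwise (· < ·) :=
    pairwise_lt_of_le_nodup (PySem.List.sorted_pairwise sr (fun x => x)) hnr
  have hd : ∀ x ∈ lsS, x ∉ rsS := by
    intro x hx hxr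
    rw [hls, PySem.List.mem_sorted, hsl, PySem.Set.mem_diff, PySem.Set.mem_ofList,
      PySem.Set.mem_ofList] at hx
    rw [hrs, PySem.List.mem_sorted, hsr, PySem.Set.mem_diff, PySem.Set.mem_ofList,
      PySem.Set.mem_ofList] at hxr
    exact hx.2 hxr.1
  rw [failF_eq_twoPtrFail lsS rsS hpl hpr hd]
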